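-- pv_equiv track=rewrite | github.com/bnuckols13/investigator | forensics.py | build_chain_of_custody
-- ===== SOURCE A (Python) =====
-- def build_chain_of_custody(entries: list[dict]) -> str:
--     """Format chain of custody entries for an evidence file.
--
--     Each entry is a dict from build_provenance() or cache_response().
--     """
--     lines = ["## Chain of Custody\n"]
--     for i, entry in enumerate(entries, 1):
--         lines.append(f"**Source {i}:**")
--         lines.append(f"- URL: `{entry.get('source_url', 'N/A')}`")
--         lines.append(f"- Retrieved: {entry.get('retrieved_at', 'N/A')}")
--         lines.append(f"- SHA-256: `{entry.get('sha256', 'N/A')}`")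
--         if entry.get("cached_at"):
--             lines.append(f"- Local cache: `{entry['cached_at']}`")
--         if entry.get("archive_url"):
--             lines.append(f"- Archive: {entry['archive_url']}")
--         if entry.get("archive_ph_url"):
--             lines.append(f"- Archive.ph: {entry['archive_ph_url']}")
--         lines.append(f"- Tool version: `{entry.get('tool_version', 'N/A')}`")
--         lines.append("")
--     return "\n".join(lines)
-- ===== SOURCE B (Python) =====
-- _FIELDS = [
--     ("source_url", "- URL: `", "`", True),
--     ("retrieved_at", "- Retrieved: ", "", True),
--     ("sha256", "- SHA-256: `", "`", True),
--     ("cached_at", "- Local cache: `", "`", False),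
--     ("archive_url", "- Archive: ", "", False),
--     ("archive_ph_url", "- Archive.ph: ", "", False),
--     ("tool_version", "- Tool version: `", "`", True),
-- ]
--
--
-- def build_chain_of_custody(entries: list[dict]) -> str:
--     """Format chain of custody entries, driven by a field-spec table."""
--     out = "## Chain of Custody\n"
--     for i, entry in enumerate(entries, 1):
--         out += "\n" + f"**Source {i}:**"
--         for key, pre, post, mandatory in _FIELDS:
--             val = entry.get(key)
--             if mandatory:
--                 out += "\n" + pre + (val if val is not None else "N/A") + post
--             elif val:
--                 out += "\n" + pre + val + post
--         out += "\n" + ""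
--     return out
-- ===== Notes on version B (the rewrite author's own statement) =====
-- stated objective: alternative
-- what changed: Replaces the straight-line list-of-lines/join builder with a table-driven formatter: an ordered field-spec table (key, prefix, suffix, mandatory-flag) iterated per entry, accumulating the result string directly instead of joining a list.
import Mathlib
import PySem

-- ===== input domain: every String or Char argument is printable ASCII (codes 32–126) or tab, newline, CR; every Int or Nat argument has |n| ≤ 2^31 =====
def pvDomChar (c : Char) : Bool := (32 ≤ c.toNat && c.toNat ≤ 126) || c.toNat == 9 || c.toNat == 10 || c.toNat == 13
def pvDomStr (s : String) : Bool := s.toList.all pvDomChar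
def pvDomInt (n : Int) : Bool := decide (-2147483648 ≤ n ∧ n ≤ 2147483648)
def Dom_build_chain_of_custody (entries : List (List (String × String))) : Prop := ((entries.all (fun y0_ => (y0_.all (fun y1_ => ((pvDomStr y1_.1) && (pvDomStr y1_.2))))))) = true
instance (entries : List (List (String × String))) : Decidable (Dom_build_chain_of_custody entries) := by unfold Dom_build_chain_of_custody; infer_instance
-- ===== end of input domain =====

-- B replaces A's straight-line list-of-lines/"\n".join builder with a table-driven
-- formatter (ordered field-spec table iterated per entry, accumulating the string
-- directly); objective: alternative decomposition, same cost.

-- ===== PORT A =====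
-- shared helper: Python `entry.get(k)` on an assoc-list dict (first match)
def pvGetKey (entry : List (String × String)) (k : String) : Option String :=
  (entry.find? (fun p => p.1 == k)).map (·.2)

-- `entry.get(k, dflt)`
def pvGetKeyD (entry : List (String × String)) (k : String) (dflt : String) : String :=
  (pvGetKey entry k).getD dflt

-- the body of A's `for i, entry in enumerate(entries, 1)` loop: sequential appends
-- to `lines`; truthiness of `entry.get(k)` (an Optional str) = present and nonempty
def pvAStep (lines : List String) (p : Int × List (String × String)) : List String :=
  let i := p.1
  let entry := p.2
  let lines := lines ++ ["**Source " ++ PySem.Int.toStr i ++ ":**"]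
  let lines := lines ++ ["- URL: `" ++ pvGetKeyD entry "source_url" "N/A" ++ "`"]
  let lines := lines ++ ["- Retrieved: " ++ pvGetKeyD entry "retrieved_at" "N/A"]
  let lines := lines ++ ["- SHA-256: `" ++ pvGetKeyD entry "sha256" "N/A" ++ "`"]
  let lines := if pvGetKeyD entry "cached_at" "" ≠ "" then
      lines ++ ["- Local cache: `" ++ pvGetKeyD entry "cached_at" "" ++ "`"] else lines
  let lines := if pvGetKeyD entry "archive_url" "" ≠ "" then
      lines ++ ["- Archive: " ++ pvGetKeyD entry "archive_url" ""] else lines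
  let lines := if pvGetKeyD entry "archive_ph_url" "" ≠ "" then
      lines ++ ["- Archive.ph: " ++ pvGetKeyD entry "archive_ph_url" ""] else lines
  let lines := lines ++ ["- Tool version: `" ++ pvGetKeyD entry "tool_version" "N/A" ++ "`"]
  lines ++ [""]

def build_chain_of_custody (entries : List (List (String × String))) : String :=
  PySem.Str.join "\n" ((PySem.List.enumerate entries 1).foldl pvAStep ["## Chain of Custody\n"])

-- ===== PORT B =====
-- B's field-spec table: (dict key, line prefix, line suffix, mandatory?)
def pvFields : List (String × String × String × Bool) :=
  [("source_url", "- URL: `", "`", true),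
   ("retrieved_at", "- Retrieved: ", "", true),
   ("sha256", "- SHA-256: `", "`", true),
   ("cached_at", "- Local cache: `", "`", false),
   ("archive_url", "- Archive: ", "", false),
   ("archive_ph_url", "- Archive.ph: ", "", false),
   ("tool_version", "- Tool version: `", "`", true)]

-- B's inner loop body over the spec table
def pvBField (entry : List (String × String)) (acc : String) (f : String × String × String × Bool) : String :=
  let val := pvGetKey entry f.1
  if f.2.2.2 then acc ++ "\n" ++ (f.2.1 ++ (val.getD "N/A") ++ f.2.2.1)
  else match val with
    | some s => if s ≠ "" then acc ++ "\n" ++ (f.2.1 ++ s ++ f.2.2.1) else acc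
    | none => acc

-- B's outer loop body
def pvBEntry (acc : String) (p : Int × List (String × String)) : String :=
  let acc := acc ++ "\n" ++ ("**Source " ++ PySem.Int.toStr p.1 ++ ":**")
  let acc := pvFields.foldl (pvBField p.2) acc
  acc ++ "\n" ++ ""

def build_chain_of_custody_alt (entries : List (List (String × String))) : String :=
  (PySem.List.enumerate entries 1).foldl pvBEntry "## Chain of Custody\n"

-- ===== PRECONDITION & SPEC =====
def Spec_build_chain_of_custody (entries : List (List (String × String))) (out : String) : Prop := out = build_chain_of_custody_alt entries
instance (entries : List (List (String × String))) (out : String) : Decidable (Spec_build_chain_of_custody entries out) := by unfold Spec_build_chain_of_custody; infer_instance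

-- ===== CLAIM (what is proved, stated in full; the proofs are below) =====
def Claim_equal_build_chain_of_custody : Prop := ∀ (entries : List (List (String × String))), Dom_build_chain_of_custody entries → Spec_build_chain_of_custody entries (build_chain_of_custody entries)

-- ===== LEMMAS AND PROOFS =====

-- "\n".join over a snoc on the char level
lemma pv_chars_join_snoc (sep : List Char) :
    ∀ (l : List (List Char)) (a c : List Char),
      PySem.Chars.join sep ((a :: l) ++ [c]) = PySem.Chars.join sep (a :: l) ++ sep ++ c := by
  intro l
  induction l with
  | nil =>
    intro a c
    rw [List.cons_append, List.nil_append, PySem.Chars.join_cons_cons,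
        PySem.Chars.join_singleton, PySem.Chars.join_singleton]
  | cons b t ih =>
    intro a c
    rw [List.cons_append, List.cons_append, PySem.Chars.join_cons_cons,
        ← List.cons_append, ih b c, PySem.Chars.join_cons_cons]
    simp [List.append_assoc]

lemma pv_join_snoc (xs : List String) (y : String) (h : xs ≠ []) :
    PySem.Str.join "\n" (xs ++ [y]) = PySem.Str.join "\n" xs ++ "\n" ++ y := by
  obtain ⟨a, l, rfl⟩ : ∃ a l, xs = a :: l := by
    cases xs with
    | nil => exact absurd rfl h
    | cons a l => exact ⟨a, l, rfl⟩
  simp only [PySem.Str.join, List.map_append, List.map_cons, List.map_nil]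
  rw [pv_chars_join_snoc]
  rw [String.ofList_append, String.ofList_append, String.ofList_toList, String.ofList_toList]

-- join over an append = fold of "append newline-prefixed line"
lemma pv_join_append (ys : List String) : ∀ (xs : List String), xs ≠ [] →
    PySem.Str.join "\n" (xs ++ ys)
      = ys.foldl (fun s l => s ++ "\n" ++ l) (PySem.Str.join "\n" xs) := by
  induction ys with
  | nil => intro xs _; simp
  | cons y ys ih =>
    intro xs h
    have hs : xs ++ y :: ys = (xs ++ [y]) ++ ys := by simp
    rw [hs, ih (xs ++ [y]) (by simp [h]), List.foldl_cons, pv_join_snoc xs y h]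

-- A's loop body as one right-nested append of line segments
lemma pvAStep_eq (lines : List String) (p : Int × List (String × String)) :
    pvAStep lines p =
      lines ++ (["**Source " ++ PySem.Int.toStr p.1 ++ ":**"]
        ++ ["- URL: `" ++ pvGetKeyD p.2 "source_url" "N/A" ++ "`"]
        ++ ["- Retrieved: " ++ pvGetKeyD p.2 "retrieved_at" "N/A"]
        ++ ["- SHA-256: `" ++ pvGetKeyD p.2 "sha256" "N/A" ++ "`"]
        ++ (if pvGetKeyD p.2 "cached_at" "" ≠ "" then
              ["- Local cache: `" ++ pvGetKeyD p.2 "cached_at" "" ++ "`"] else [])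
        ++ (if pvGetKeyD p.2 "archive_url" "" ≠ "" then
              ["- Archive: " ++ pvGetKeyD p.2 "archive_url" ""] else [])
        ++ (if pvGetKeyD p.2 "archive_ph_url" "" ≠ "" then
              ["- Archive.ph: " ++ pvGetKeyD p.2 "archive_ph_url" ""] else [])
        ++ ["- Tool version: `" ++ pvGetKeyD p.2 "tool_version" "N/A" ++ "`"] ++ [""]) := by
  simp only [pvAStep]
  split_ifs <;> simp

lemma pv_foldl_if {α β : Type} (f : β → α → β) (b : Prop) [Decidable b] (u : α) (acc : β) :
    List.foldl f acc (if b then [u] else []) = if b then f acc u else acc := by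
  split_ifs <;> simp

lemma pv_bfield_mand (entry : List (String × String)) (acc k pre post : String) :
    pvBField entry acc (k, pre, post, true)
      = acc ++ "\n" ++ (pre ++ (pvGetKey entry k).getD "N/A" ++ post) := rfl

lemma pv_bfield_opt (entry : List (String × String)) (acc k pre post : String) :
    pvBField entry acc (k, pre, post, false)
      = if pvGetKeyD entry k "" ≠ "" then
          acc ++ "\n" ++ (pre ++ pvGetKeyD entry k "" ++ post) else acc := by
  simp only [pvBField, pvGetKeyD]
  cases pvGetKey entry k with
  | none => simp
  | some s => rfl

-- one entry: A's appended block, joined, equals B's per-entry chunk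
lemma pv_step (lines : List String) (h : lines ≠ []) (p : Int × List (String × String)) :
    PySem.Str.join "\n" (pvAStep lines p) = pvBEntry (PySem.Str.join "\n" lines) p := by
  obtain ⟨i, entry⟩ := p
  rw [pvAStep_eq, pv_join_append _ lines h]
  simp only [pvBEntry, pvFields, List.foldl_cons, List.foldl_nil, pv_bfield_mand, pv_bfield_opt,
             List.foldl_append, pv_foldl_if, pvGetKeyD]
  split_ifs <;> simp

lemma pv_nonempty (lines : List String) (p : Int × List (String × String)) :
    pvAStep lines p ≠ [] := by
  rw [pvAStep_eq]
  simp

lemma pv_main (entries : List (List (String × String))) :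
    ∀ (n : Int) (lines : List String), lines ≠ [] →
    PySem.Str.join "\n" ((PySem.List.enumerate entries n).foldl pvAStep lines)
      = (PySem.List.enumerate entries n).foldl pvBEntry (PySem.Str.join "\n" lines) := by
  induction entries with
  | nil => intro n lines _; simp [PySem.List.enumerate]
  | cons e rest ih =>
    intro n lines h
    rw [PySem.List.enumerate_cons, List.foldl_cons, List.foldl_cons,
        ih (n + 1) (pvAStep lines (n, e)) (pv_nonempty lines (n, e)), pv_step lines h (n, e)]

-- ===== VERDICT (by name: the statement is the Claim_ definition above) =====
theorem build_chain_of_custody_spec : Claim_equal_build_chain_of_custody := by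
  intro entries _
  unfold Spec_build_chain_of_custody build_chain_of_custody build_chain_of_custody_alt
  rw [pv_main entries 1 ["## Chain of Custody\n"] (by simp)]
  rfl
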